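-- pv_equiv track=rewrite | github.com/SimLeek/STRIPEncoder | stripencode/encode2d.py | calc_image_pyramid_from_resolution
-- ===== SOURCE A (Python) =====
-- import math
--
-- def calc_image_pyramid_from_resolution(image_resolution, num_levels=None):
--     """
--     Given an image resolution (H, W), compute the pyramid levels.
--     At each level the total pixel count is halved by scaling H and W by 1/sqrt(2).
--     The pyramid continues until reaching 1x1.
--     If num_levels is provided, only return the last num_levels levels (always including the 1x1 level).
--
--     Returns:
--         resolutions: List of (H, W) tuples for each level.
--         actual_levels: Total number of levels in the pyramid.
--     """
--     H, W = image_resolution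
--     resolutions = [(H, W)]
--     scale_factor = 1 / math.sqrt(2)
--     while resolutions[-1][0] > 1 or resolutions[-1][1] > 1:
--         prev_H, prev_W = resolutions[-1]
--         new_H = max(1, int(prev_H * scale_factor))
--         new_W = max(1, int(prev_W * scale_factor))
--         # Prevent repeated same size if already at 1 in one dimension
--         if (new_H, new_W) == resolutions[-1]:
--             break
--         resolutions.append((new_H, new_W))
--     if num_levels is not None:
--         # Always include the last (smallest) num_levels; discard earlier levels
--         resolutions = resolutions[-num_levels:]
--     return resolutions, len(resolutions)
-- ===== SOURCE B (Python) =====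
-- import math
--
--
-- def calc_image_pyramid_from_resolution(image_resolution, num_levels=None):
--     """Build the pyramid per dimension: count the halving steps H and W each
--     need to reach <=1, generate the two independent sequences for the common
--     number of levels, and zip them."""
--     H, W = image_resolution
--     scale = 1 / math.sqrt(2)
--
--     def nxt(v):
--         return max(1, int(v * scale))
--
--     def steps(v):
--         s = 0
--         while v > 1:
--             v = nxt(v)
--             s += 1
--         return s
--
--     n = max(steps(H), steps(W))
--     hs = [H]
--     ws = [W]
--     for _ in range(n):
--         hs.append(nxt(hs[-1]))
--         ws.append(nxt(ws[-1]))
--     resolutions = list(zip(hs, ws))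
--     if num_levels is not None:
--         resolutions = resolutions[-num_levels:]
--     return resolutions, len(resolutions)
-- ===== Notes on version B (the rewrite author's own statement) =====
-- stated objective: alternative
-- what changed: A iterates one while-loop on (H,W) pairs with a repeat-break guard; B computes per-dimension step counts to reach <=1, generates the two 1-D level sequences independently, and zips them.
import Mathlib
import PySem

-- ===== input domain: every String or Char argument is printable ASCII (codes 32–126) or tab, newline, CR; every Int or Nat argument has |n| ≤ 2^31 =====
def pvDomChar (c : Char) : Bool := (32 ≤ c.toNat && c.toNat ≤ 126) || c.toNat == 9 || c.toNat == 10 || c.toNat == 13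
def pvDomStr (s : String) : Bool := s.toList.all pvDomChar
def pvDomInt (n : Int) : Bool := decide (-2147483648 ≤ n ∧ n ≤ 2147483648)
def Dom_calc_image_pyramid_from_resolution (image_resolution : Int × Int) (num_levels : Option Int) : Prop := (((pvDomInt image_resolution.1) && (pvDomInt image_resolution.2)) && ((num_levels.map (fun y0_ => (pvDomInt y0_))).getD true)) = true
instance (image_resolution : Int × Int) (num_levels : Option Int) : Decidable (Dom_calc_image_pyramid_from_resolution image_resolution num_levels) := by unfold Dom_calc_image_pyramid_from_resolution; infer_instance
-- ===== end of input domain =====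

-- B replaces A's single while-loop over (H,W) pairs by two independent per-dimension
-- step counts and sequences that are zipped together (objective: alternative decomposition).

-- ===== PORT A =====

-- scale_factor = 1/math.sqrt(2) is the IEEE-754 double pvM / 2^53 exactly.
def pvM : Nat := 6369051672525772

-- round a natural to the nearest multiple of 2^k, ties to even (IEEE round-to-nearest).
def pvRnd (p k : Nat) : Nat :=
  if 2 ^ (k - 1) < p % 2 ^ k ∨ (p % 2 ^ k = 2 ^ (k - 1) ∧ (p / 2 ^ k) % 2 = 1) then
    (p / 2 ^ k + 1) * 2 ^ k
  else (p / 2 ^ k) * 2 ^ k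

-- exact model of Python's int(v * 0.7071067811865475) for |v| ≤ 2^53:
-- v is exact as a double, the product is rounded once to 53 significant bits,
-- then int() truncates toward zero.
def pvFl (v : Int) : Int :=
  let p := v.natAbs * pvM
  let out : Nat :=
    if p = 0 then 0
    else (if Nat.log2 p + 1 ≤ 53 then p else pvRnd p (Nat.log2 p + 1 - 53)) / 2 ^ 53
  if v < 0 then -(out : Int) else (out : Int)

-- A's while-loop, carrying resolutions[-1] as (h, w); fuel is only a termination guard.
def pvLoopA : Int → Int → Nat → List (Int × Int)
  | h, w, 0 => [(h, w)]
  | h, w, f + 1 =>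
    if h > 1 ∨ w > 1 then
      let nh := max 1 (pvFl h)
      let nw := max 1 (pvFl w)
      if (nh, nw) = (h, w) then [(h, w)]
      else (h, w) :: pvLoopA nh nw f
    else [(h, w)]

def calc_image_pyramid_from_resolution (image_resolution : Int × Int) (num_levels : Option Int) : (List (Int × Int)) × Int :=
  let resolutions := pvLoopA image_resolution.1 image_resolution.2 (image_resolution.1.natAbs + image_resolution.2.natAbs + 1)
  match num_levels with
  | none => (resolutions, (resolutions.length : Int))
  | some n =>
    let resolutions := PySem.List.slice resolutions (some (-n)) none
    (resolutions, (resolutions.length : Int))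

-- ===== PORT B =====

-- B's steps(v): number of applications of nxt needed to bring v to ≤ 1 (fuel = guard only).
def pvStepsB : Int → Nat → Nat
  | _, 0 => 0
  | v, f + 1 => if v > 1 then pvStepsB (max 1 (pvFl v)) f + 1 else 0

-- B's per-dimension sequence [v, nxt v, nxt (nxt v), …] with n+1 entries.
def pvChainB : Int → Nat → List Int
  | v, 0 => [v]
  | v, n + 1 => v :: pvChainB (max 1 (pvFl v)) n

def calc_image_pyramid_from_resolution_alt (image_resolution : Int × Int) (num_levels : Option Int) : (List (Int × Int)) × Int :=
  let n := max (pvStepsB image_resolution.1 (image_resolution.1.natAbs + 1)) (pvStepsB image_resolution.2 (image_resolution.2.natAbs + 1))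
  let resolutions := List.zip (pvChainB image_resolution.1 n) (pvChainB image_resolution.2 n)
  match num_levels with
  | none => (resolutions, (resolutions.length : Int))
  | some n =>
    let resolutions := PySem.List.slice resolutions (some (-n)) none
    (resolutions, (resolutions.length : Int))

-- ===== PRECONDITION & SPEC =====
def Spec_calc_image_pyramid_from_resolution (image_resolution : Int × Int) (num_levels : Option Int) (out : (List (Int × Int)) × Int) : Prop := out = calc_image_pyramid_from_resolution_alt image_resolution num_levels
instance (image_resolution : Int × Int) (num_levels : Option Int) (out : (List (Int × Int)) × Int) : Decidable (Spec_calc_image_pyramid_from_resolution image_resolution num_levels out) := by unfold Spec_calc_image_pyramid_from_resolution; infer_instance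

-- ===== CLAIM (what is proved, stated in full; the proofs are below) =====
def Claim_equal_calc_image_pyramid_from_resolution : Prop := ∀ (image_resolution : Int × Int) (num_levels : Option Int), Dom_calc_image_pyramid_from_resolution image_resolution num_levels → Spec_calc_image_pyramid_from_resolution image_resolution num_levels (calc_image_pyramid_from_resolution image_resolution num_levels)

-- ===== LEMMAS AND PROOFS =====

lemma pvRnd_le (p k : Nat) (hk : 1 ≤ k) : pvRnd p k ≤ p + 2 ^ (k - 1) := by
  unfold pvRnd
  have hdm := Nat.div_add_mod p (2 ^ k)
  have h2 : 2 ^ k = 2 ^ (k - 1) * 2 := by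
    rw [← pow_succ]
    congr 1
    omega
  split_ifs with hcond
  · rcases hcond with hlt | ⟨heq, _⟩ <;> nlinarith [Nat.mod_lt p (show 0 < 2 ^ k by positivity)]
  · nlinarith [Nat.two_pow_pos (k - 1), Nat.zero_le (p % 2 ^ k)]

lemma pvFl_lt (v : Int) (hv : 2 ≤ v) : pvFl v < v := by
  unfold pvFl
  have hvn : ¬ v < 0 := by omega
  rw [if_neg hvn]
  set n := v.natAbs with hn
  have hn2 : 2 ≤ n := by omega
  have hnv : (n : Int) = v := by omega
  set p := n * pvM with hp
  have hMlo : 2 ^ 52 ≤ pvM := by norm_num [pvM]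
  have hMhi : pvM ≤ 2 ^ 53 - 1 := by norm_num [pvM]
  have hppos : p ≠ 0 := by positivity
  have hpge : 2 ^ 53 ≤ p := by
    calc (2:ℕ) ^ 53 = 2 * 2 ^ 52 := by norm_num
    _ ≤ n * pvM := Nat.mul_le_mul hn2 hMlo
  have hlog : 53 ≤ Nat.log2 p := by
    rw [Nat.le_log2 (by omega)]; exact hpge
  have hself : 2 ^ Nat.log2 p ≤ p := Nat.log2_self_le (by omega)
  rw [if_neg hppos]
  have hL : ¬ (Nat.log2 p + 1 ≤ 53) := by omega
  rw [if_neg hL]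
  -- the rounded product is < n * 2^53, hence the truncated quotient is < n
  set k := Nat.log2 p + 1 - 53 with hk
  have hk1 : 1 ≤ k := by omega
  have hRle : pvRnd p k ≤ p + 2 ^ (k - 1) := pvRnd_le p k hk1
  have hhalf : 2 ^ (k - 1) * 2 ^ 53 ≤ p := by
    calc 2 ^ (k - 1) * 2 ^ 53 = 2 ^ (k - 1 + 53) := by rw [pow_add]
    _ ≤ 2 ^ Nat.log2 p := Nat.pow_le_pow_right (by norm_num) (by omega)
    _ ≤ p := hself
  have hplt : p + 2 ^ (k - 1) < n * 2 ^ 53 := by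
    have h1 : p ≤ n * 2 ^ 53 - n := by
      calc p = n * pvM := hp
      _ ≤ n * (2 ^ 53 - 1) := Nat.mul_le_mul_left n hMhi
      _ = n * 2 ^ 53 - n := by rw [Nat.mul_sub_one, Nat.mul_comm]
    have h2 : 2 ^ (k - 1) ≤ n - 1 := by
      by_contra hc
      push_neg at hc
      have : n * 2 ^ 53 ≤ 2 ^ (k - 1) * 2 ^ 53 := Nat.mul_le_mul_right _ (by omega)
      omega
    have hn53 : n ≤ n * 2 ^ 53 := Nat.le_mul_of_pos_right n (by positivity)
    omega
  have hdiv : pvRnd p k / 2 ^ 53 < n := by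
    rw [Nat.div_lt_iff_lt_mul (by positivity)]
    omega
  omega

lemma pvNxt_one (v : Int) (hv : v ≤ 1) : max 1 (pvFl v) = 1 := by
  have h : pvFl v ≤ 1 := by
    rcases lt_trichotomy v 0 with hneg | hzero | hpos
    · unfold pvFl
      rw [if_pos hneg]
      omega
    · subst hzero; decide
    · have hv1 : v = 1 := by omega
      subst hv1; decide
  omega

-- the true step count of one dimension
def pvS (v : Int) : Nat :=
  if h : v > 1 then pvS (max 1 (pvFl v)) + 1 else 0
termination_by v.toNat
decreasing_by
  have h1 : pvFl v < v := pvFl_lt v (by omega)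
  omega

lemma pvS_gt (v : Int) (h : v > 1) : pvS v = pvS (max 1 (pvFl v)) + 1 := by
  rw [pvS]; rw [dif_pos h]

lemma pvS_le (v : Int) (h : v ≤ 1) : pvS v = 0 := by
  rw [pvS]; rw [dif_neg (by omega)]

lemma pvS_le_toNat (v : Int) : pvS v ≤ v.toNat := by
  have H : ∀ (m : Nat) (v : Int), v.toNat ≤ m → pvS v ≤ v.toNat := by
    intro m
    induction m with
    | zero =>
      intro v hv
      rw [pvS_le v (by omega)]
      omega
    | succ m ih =>
      intro v hv
      by_cases h : v > 1
      · rw [pvS_gt v h]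
        have hlt : pvFl v < v := pvFl_lt v (by omega)
        have := ih (max 1 (pvFl v)) (by omega)
        omega
      · rw [pvS_le v (by omega)]
        omega
  exact H v.toNat v le_rfl

lemma pvStepsB_eq (f : Nat) (v : Int) (hf : pvS v ≤ f) : pvStepsB v f = pvS v := by
  induction f generalizing v with
  | zero =>
    by_cases h : v > 1
    · rw [pvS_gt v h] at hf; omega
    · rw [pvS_le v (by omega)]; rfl
  | succ f ih =>
    by_cases h : v > 1
    · rw [pvS_gt v h] at hf ⊢
      show (if v > 1 then pvStepsB (max 1 (pvFl v)) f + 1 else 0) = _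
      rw [if_pos h, ih _ (by omega)]
    · rw [pvS_le v (by omega)]
      show (if v > 1 then pvStepsB (max 1 (pvFl v)) f + 1 else 0) = 0
      rw [if_neg h]

lemma pvLoopA_eq_zip (f : Nat) (h w : Int) (hf : max (pvS h) (pvS w) ≤ f) :
    pvLoopA h w f = List.zip (pvChainB h (max (pvS h) (pvS w))) (pvChainB w (max (pvS h) (pvS w))) := by
  induction f generalizing h w with
  | zero =>
    have hmax : max (pvS h) (pvS w) = 0 := by omega
    rw [hmax]
    rfl
  | succ f ih =>
    by_cases hc : h > 1 ∨ w > 1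
    · -- the active loop branch; the break test can never fire
      have hSh : h > 1 → pvS h = pvS (max 1 (pvFl h)) + 1 := pvS_gt h
      have hSh0 : ¬ h > 1 → pvS h = 0 ∧ pvS (max 1 (pvFl h)) = 0 := by
        intro hh
        have h1 : max 1 (pvFl h) = 1 := pvNxt_one h (by omega)
        exact ⟨pvS_le h (by omega), by rw [h1]; exact pvS_le 1 (by omega)⟩
      have hSw : w > 1 → pvS w = pvS (max 1 (pvFl w)) + 1 := pvS_gt w
      have hSw0 : ¬ w > 1 → pvS w = 0 ∧ pvS (max 1 (pvFl w)) = 0 := by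
        intro hw
        have h1 : max 1 (pvFl w) = 1 := pvNxt_one w (by omega)
        exact ⟨pvS_le w (by omega), by rw [h1]; exact pvS_le 1 (by omega)⟩
      have hne : ¬ ((max 1 (pvFl h), max 1 (pvFl w)) = (h, w)) := by
        rcases hc with hh | hw
        · have := pvFl_lt h (by omega)
          intro heq
          have : max 1 (pvFl h) = h := (Prod.mk.injEq _ _ _ _ ▸ heq).1
          omega
        · have := pvFl_lt w (by omega)
          intro heq
          have : max 1 (pvFl w) = w := (Prod.mk.injEq _ _ _ _ ▸ heq).2
          omega
      have hstep : pvLoopA h w (f + 1) = (h, w) :: pvLoopA (max 1 (pvFl h)) (max 1 (pvFl w)) f := by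
        show (if h > 1 ∨ w > 1 then _ else _) = _
        rw [if_pos hc, if_neg hne]
      have hN : max (pvS (max 1 (pvFl h))) (pvS (max 1 (pvFl w))) + 1 = max (pvS h) (pvS w) := by
        by_cases hh : h > 1 <;> by_cases hw : w > 1
        · have e1 := hSh hh; have e2 := hSw hw; omega
        · have e1 := hSh hh; have e2 := hSw0 hw; omega
        · have e1 := hSh0 hh; have e2 := hSw hw; omega
        · rcases hc with h' | h' <;> omega
      rw [hstep, ih _ _ (by omega), ← hN]
      rfl
    · push_neg at hc
      have h0 : pvS h = 0 := pvS_le h (by omega)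
      have w0 : pvS w = 0 := pvS_le w (by omega)
      have : pvLoopA h w (f + 1) = [(h, w)] := by
        show (if h > 1 ∨ w > 1 then _ else _) = _
        rw [if_neg (by push_neg; exact hc)]
      rw [this, h0, w0]
      rfl

-- ===== VERDICT (by name: the statement is the Claim_ definition above) =====
theorem calc_image_pyramid_from_resolution_spec : Claim_equal_calc_image_pyramid_from_resolution := by
  intro ir nl _dom
  unfold Spec_calc_image_pyramid_from_resolution
  unfold calc_image_pyramid_from_resolution calc_image_pyramid_from_resolution_alt
  have hSh := pvS_le_toNat ir.1
  have hSw := pvS_le_toNat ir.2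
  have hns : max (pvStepsB ir.1 (ir.1.natAbs + 1)) (pvStepsB ir.2 (ir.2.natAbs + 1)) = max (pvS ir.1) (pvS ir.2) := by
    rw [pvStepsB_eq _ _ (by omega), pvStepsB_eq _ _ (by omega)]
  have hres : pvLoopA ir.1 ir.2 (ir.1.natAbs + ir.2.natAbs + 1) =
      List.zip (pvChainB ir.1 (max (pvS ir.1) (pvS ir.2))) (pvChainB ir.2 (max (pvS ir.1) (pvS ir.2))) :=
    pvLoopA_eq_zip _ _ _ (by omega)
  rw [hns, hres]
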